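-- pv_equiv track=rewrite | github.com/flowersteam/value_stability | evaluate.py | create_simulated_messages
-- ===== SOURCE A (Python) =====
-- def create_simulated_messages(conv, last="user"):
--     # simulate a conversation between two LLMs
--     if last == "user":
--         # last role is user
--         sim_conv = list(zip(["user", "assistant"] * (len(conv) // 2 + 1), conv[::-1]))[::-1]
--     elif last == "assistant":
--         # last role is assistant
--         sim_conv = list(zip(["assistant", "user"] * (len(conv) // 2 + 1), conv[::-1]))[::-1]
--     else:
--         raise ValueError("last must be other user or assistant")
--
--     sim_conv_messages = [{"role": role, "content": msg} for role, msg in sim_conv]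
--     return sim_conv_messages
-- ===== SOURCE B (Python) =====
-- def create_simulated_messages(conv, last="user"):
--     # role by index parity: the last element gets role `last`, alternating backwards
--     if last == "user":
--         other = "assistant"
--     elif last == "assistant":
--         other = "user"
--     else:
--         raise ValueError("last must be other user or assistant")
--     n = len(conv)
--     return [{"role": last if (n - 1 - i) % 2 == 0 else other, "content": msg}
--             for i, msg in enumerate(conv)]
-- ===== Notes on version B (the rewrite author's own statement) =====
-- stated objective: simpler
-- what changed: Replaces the reverse-zip-with-replicated-role-list-reverse construction by a single forward enumerate loop that computes each role from index parity ((n-1-i) % 2), so the last message gets role `last`.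
import Mathlib
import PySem

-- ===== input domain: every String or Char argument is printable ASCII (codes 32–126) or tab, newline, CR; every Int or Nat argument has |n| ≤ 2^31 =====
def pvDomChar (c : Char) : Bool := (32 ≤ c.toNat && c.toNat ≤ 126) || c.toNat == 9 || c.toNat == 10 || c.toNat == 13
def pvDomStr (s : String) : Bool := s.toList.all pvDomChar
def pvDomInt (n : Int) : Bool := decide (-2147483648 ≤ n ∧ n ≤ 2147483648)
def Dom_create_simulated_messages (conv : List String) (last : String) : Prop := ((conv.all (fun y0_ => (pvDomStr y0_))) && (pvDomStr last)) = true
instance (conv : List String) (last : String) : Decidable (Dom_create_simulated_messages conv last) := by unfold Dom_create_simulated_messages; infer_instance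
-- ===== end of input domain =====

-- B replaces A's reverse/zip-with-replicated-roles/reverse construction by one forward
-- enumerate pass computing each role from index parity (objective: simpler).

-- ===== PORT A =====
def create_simulated_messages (conv : List String) (last : String) : List (List (String × String)) :=
  if last == "user" then
    let sim_conv := (((List.replicate (conv.length / 2 + 1) ["user", "assistant"]).flatten).zip conv.reverse).reverse
    sim_conv.map (fun p => [("role", p.1), ("content", p.2)])
  else if last == "assistant" then
    let sim_conv := (((List.replicate (conv.length / 2 + 1) ["assistant", "user"]).flatten).zip conv.reverse).reverse
    sim_conv.map (fun p => [("role", p.1), ("content", p.2)])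
  else []  -- Python raises ValueError here; excluded by Pre_

-- ===== PORT B =====
def create_simulated_messages_alt (conv : List String) (last : String) : List (List (String × String)) :=
  if last == "user" then
    let n : Int := conv.length
    (PySem.List.enumerate conv).map (fun p =>
      [("role", if PySem.Int.mod (n - 1 - p.1) 2 == 0 then last else "assistant"), ("content", p.2)])
  else if last == "assistant" then
    let n : Int := conv.length
    (PySem.List.enumerate conv).map (fun p =>
      [("role", if PySem.Int.mod (n - 1 - p.1) 2 == 0 then last else "user"), ("content", p.2)])
  else []  -- Python raises ValueError here; excluded by Pre_

-- ===== PRECONDITION & SPEC =====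
-- A (and B) raise ValueError unless last is "user" or "assistant".
def Pre_create_simulated_messages (conv : List String) (last : String) : Prop :=
  last = "user" ∨ last = "assistant"
instance (conv : List String) (last : String) : Decidable (Pre_create_simulated_messages conv last) := by unfold Pre_create_simulated_messages; infer_instance
def pvWitness_create_simulated_messages : List String × String := (["hi", "hello", "how are you?"], "user")

def Spec_create_simulated_messages (conv : List String) (last : String) (out : List (List (String × String))) : Prop := out = create_simulated_messages_alt conv last
instance (conv : List String) (last : String) (out : List (List (String × String))) : Decidable (Spec_create_simulated_messages conv last out) := by unfold Spec_create_simulated_messages; infer_instance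

-- ===== CLAIM (what is proved, stated in full; the proofs are below) =====
def Claim_equal_create_simulated_messages : Prop := ∀ (conv : List String) (last : String), Dom_create_simulated_messages conv last → Pre_create_simulated_messages conv last → Spec_create_simulated_messages conv last (create_simulated_messages conv last)

-- ===== LEMMAS AND PROOFS =====

theorem flat_rep_length (k : Nat) (a b : String) :
    ((List.replicate k [a, b]).flatten).length = 2 * k := by
  induction k with
  | zero => simp
  | succ k ih => simp [List.replicate_succ, ih]; omega

theorem flat_rep_getElem (k j : Nat) (a b : String) (h : j < ((List.replicate k [a, b]).flatten).length) :
    ((List.replicate k [a, b]).flatten)[j] = if j % 2 = 0 then a else b := by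
  induction k generalizing j with
  | zero => simp at h
  | succ k ih =>
    have hcons : (List.replicate (k + 1) [a, b]).flatten = a :: b :: (List.replicate k [a, b]).flatten := by
      simp [List.replicate_succ]
    rw [List.getElem_of_eq hcons]
    match j with
    | 0 => rfl
    | 1 => rfl
    | (j + 2) =>
      simp only [List.getElem_cons_succ]
      have hlt : j < ((List.replicate k [a, b]).flatten).length := by
        have := h; rw [flat_rep_length] at this ⊢; omega
      rw [ih j hlt]
      have : (j + 2) % 2 = j % 2 := by omega
      rw [this]

theorem one_side (conv : List String) (a b : String) :
    ((((List.replicate (conv.length / 2 + 1) [a, b]).flatten).zip conv.reverse).reverse).map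
      (fun p => [("role", p.1), ("content", p.2)]) =
    (PySem.List.enumerate conv).map (fun p =>
      [("role", if PySem.Int.mod ((conv.length : Int) - 1 - p.1) 2 == 0 then a else b), ("content", p.2)]) := by
  have hfl : ((List.replicate (conv.length / 2 + 1) [a, b]).flatten).length = 2 * (conv.length / 2 + 1) :=
    flat_rep_length _ a b
  have hzlen : ((((List.replicate (conv.length / 2 + 1) [a, b]).flatten).zip conv.reverse)).length = conv.length := by
    simp [List.length_zip, hfl]; omega
  apply List.ext_getElem
  · simp [hzlen, PySem.List.length_enumerate]
  · intro i h1 h2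
    have hi : i < conv.length := by simpa [hzlen] using h1
    rw [List.getElem_map, List.getElem_map, List.getElem_reverse, List.getElem_zip,
        PySem.List.getElem_enumerate]
    simp only [hzlen]
    rw [List.getElem_reverse]
    have hidx : conv.length - 1 - (conv.length - 1 - i) = i := by omega
    simp only [hidx]
    have hj : conv.length - 1 - i < ((List.replicate (conv.length / 2 + 1) [a, b]).flatten).length := by
      rw [hfl]; omega
    rw [flat_rep_getElem _ _ a b hj]
    have hcond : ((PySem.Int.mod ((conv.length : Int) - 1 - ((0 : Int) + (i : Int))) 2 == 0) = true)
        ↔ (conv.length - 1 - i) % 2 = 0 := by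
      rw [PySem.Int.mod_eq_emod_of_pos (by norm_num)]
      simp only [beq_iff_eq]
      omega
    by_cases hpar : (conv.length - 1 - i) % 2 = 0
    · rw [if_pos hpar, if_pos (hcond.mpr hpar)]
    · rw [if_neg hpar, if_neg (fun hc => hpar (hcond.mp hc))]

-- ===== VERDICT (by name: the statement is the Claim_ definition above) =====
theorem create_simulated_messages_spec : Claim_equal_create_simulated_messages := by
  intro conv last _ hpre
  unfold Spec_create_simulated_messages create_simulated_messages create_simulated_messages_alt
  rcases hpre with h | h <;> subst h
  · rw [if_pos (by decide), if_pos (by decide)]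
    exact one_side conv _ _
  · rw [if_neg (by decide), if_pos (by decide), if_neg (by decide), if_pos (by decide)]
    exact one_side conv _ _
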